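-- pv_equiv track=rewrite | github.com/Swanand33/Insight.IQ | src/ai_analyzer.py | _format_trend_analysis
-- ===== SOURCE A (Python) =====
-- from typing import Dict, Any, List, Optional
--
-- def _format_trend_analysis(insights: Dict[str, Any]) -> str:
--     """Format trend analysis."""
--     numeric_insights = insights.get('numeric_insights', {})
--
--     trends = {'increasing': [], 'decreasing': [], 'stable': []}
--
--     for col, stats in numeric_insights.items():
--         if isinstance(stats, dict):
--             trend = stats.get('trend', 'unknown')
--             if trend in trends:
--                 trends[trend].append(col)
--
--     formatted = []
--     for trend_type, columns in trends.items():
--         if columns: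
--             formatted.append(f"{trend_type.upper()}: {', '.join(columns)}")
--
--     return "\n".join(formatted) if formatted else "No trend analysis available"
-- ===== SOURCE B (Python) =====
-- def _format_trend_analysis(insights):
--     """Format trend analysis."""
--     numeric_insights = insights.get('numeric_insights', {})
--     parts = []
--     for trend_type in ('increasing', 'decreasing', 'stable'):
--         cols = [col for col, stats in numeric_insights.items()
--                 if isinstance(stats, dict) and stats.get('trend', 'unknown') == trend_type]
--         if cols:
--             parts.append(f"{trend_type.upper()}: {', '.join(cols)}")
--     return "\n".join(parts) if parts else "No trend analysis available"
-- ===== Notes on version B (the rewrite author's own statement) =====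
-- stated objective: simpler
-- what changed: Drops A's mutable grouping dict: B makes one filtering pass (a comprehension over the items) per trend category in the fixed order instead of building and then re-iterating an index table.
import Mathlib
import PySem

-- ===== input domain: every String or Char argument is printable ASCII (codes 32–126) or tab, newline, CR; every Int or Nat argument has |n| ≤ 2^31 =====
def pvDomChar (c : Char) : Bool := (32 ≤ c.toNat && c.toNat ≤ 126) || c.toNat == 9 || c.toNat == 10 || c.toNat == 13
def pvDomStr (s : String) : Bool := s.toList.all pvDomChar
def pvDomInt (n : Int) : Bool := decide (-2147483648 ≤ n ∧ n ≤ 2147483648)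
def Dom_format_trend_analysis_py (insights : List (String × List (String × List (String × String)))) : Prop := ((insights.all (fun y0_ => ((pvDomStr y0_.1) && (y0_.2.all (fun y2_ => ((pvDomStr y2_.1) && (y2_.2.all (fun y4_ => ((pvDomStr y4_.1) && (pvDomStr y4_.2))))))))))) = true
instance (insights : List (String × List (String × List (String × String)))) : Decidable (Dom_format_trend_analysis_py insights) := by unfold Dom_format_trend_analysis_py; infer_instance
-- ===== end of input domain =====

-- In the typed setting every `stats` value is a dict, so Python's `isinstance(stats, dict)`
-- guard is always true and both ports omit it.
-- B is simpler: one filtering pass per trend category in the fixed order, no grouping dict.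

-- ===== PORT A =====
-- A: build a dict 'trends' grouping column names by trend, then format its items in order.
def format_trend_analysis_py (insights : List (String × List (String × List (String × String)))) : String :=
  let numeric := (List.lookup "numeric_insights" insights).getD []
  let trends0 : PySem.Dict String (List String) :=
    PySem.Dict.ofList [("increasing", []), ("decreasing", []), ("stable", [])]
  let trends := numeric.foldl (fun tr p =>
      let trend := (List.lookup "trend" p.2).getD "unknown"
      if tr.contains trend then tr.modify trend [] (fun cs => cs ++ [p.1]) else tr) trends0
  let formatted := trends.items.foldl (fun acc p =>
      if p.2.isEmpty then acc
      else acc ++ [PySem.Str.upper p.1 ++ ": " ++ PySem.Str.join ", " p.2]) []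
  if formatted.isEmpty then "No trend analysis available" else PySem.Str.join "\n" formatted

-- ===== PORT B =====
-- B: for each of the three category names, one filter over the items; no intermediate dict.
def format_trend_analysis_py_alt (insights : List (String × List (String × List (String × String)))) : String :=
  let numeric := (List.lookup "numeric_insights" insights).getD []
  let parts := ["increasing", "decreasing", "stable"].foldl (fun acc t =>
      let cols := (numeric.filter
          (fun p => (List.lookup "trend" p.2).getD "unknown" == t)).map Prod.fst
      if cols.isEmpty then acc
      else acc ++ [PySem.Str.upper t ++ ": " ++ PySem.Str.join ", " cols]) []
  if parts.isEmpty then "No trend analysis available" else PySem.Str.join "\n" parts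

-- ===== PRECONDITION & SPEC =====
def Spec_format_trend_analysis_py (insights : List (String × List (String × List (String × String)))) (out : String) : Prop := out = format_trend_analysis_py_alt insights
instance (insights : List (String × List (String × List (String × String)))) (out : String) : Decidable (Spec_format_trend_analysis_py insights out) := by unfold Spec_format_trend_analysis_py; infer_instance

-- ===== CLAIM (what is proved, stated in full; the proofs are below) =====
def Claim_equal_format_trend_analysis_py : Prop := ∀ (insights : List (String × List (String × List (String × String)))), Dom_format_trend_analysis_py insights → Spec_format_trend_analysis_py insights (format_trend_analysis_py insights)

-- ===== LEMMAS AND PROOFS =====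

-- The loop body of A's grouping pass.
def pvStep (tr : PySem.Dict String (List String)) (p : String × List (String × String)) :
    PySem.Dict String (List String) :=
  if tr.contains ((List.lookup "trend" p.2).getD "unknown")
  then tr.modify ((List.lookup "trend" p.2).getD "unknown") [] (fun cs => cs ++ [p.1]) else tr

lemma pvStep_keys (d : PySem.Dict String (List String)) (p : String × List (String × String)) :
    (pvStep d p).keys = d.keys := by
  unfold pvStep
  split_ifs with h
  · rw [PySem.Dict.keys_modify, PySem.Dict.keys_insert_of_contains]
    exact h
  · rfl

lemma pvFold_keys (l : List (String × List (String × String)))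
    (d : PySem.Dict String (List String)) : (l.foldl pvStep d).keys = d.keys := by
  induction l generalizing d with
  | nil => rfl
  | cons p l ih => simp [List.foldl, ih, pvStep_keys]

lemma pvFold_getD (l : List (String × List (String × String)))
    (d : PySem.Dict String (List String)) (t : String) (ht : d.contains t = true) :
    (l.foldl pvStep d).getD t []
      = d.getD t [] ++
        (l.filter (fun p => (List.lookup "trend" p.2).getD "unknown" == t)).map Prod.fst := by
  induction l generalizing d with
  | nil => simp
  | cons p l ih =>
    have hcont : (pvStep d p).contains t = true := by
      rw [PySem.Dict.contains_iff_mem_keys, pvStep_keys, ← PySem.Dict.contains_iff_mem_keys]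
      exact ht
    rw [List.foldl_cons, ih (pvStep d p) hcont]
    by_cases hte : (List.lookup "trend" p.2).getD "unknown" = t
    · have : pvStep d p = d.modify t [] (fun cs => cs ++ [p.1]) := by
        unfold pvStep; rw [hte]; simp [ht]
      rw [this, PySem.Dict.getD_modify_self]
      simp [hte]
    · have hgd : (pvStep d p).getD t [] = d.getD t [] := by
        unfold pvStep
        split
        · exact PySem.Dict.getD_modify_of_ne d [] _ (fun h => hte h.symm)
        · rfl
      rw [hgd]
      simp [hte]

-- A's grouped items list is exactly the three per-category filters, in order.
lemma pvTrends_items (numeric : List (String × List (String × String))) :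
    (numeric.foldl pvStep
        (PySem.Dict.ofList [("increasing", []), ("decreasing", []), ("stable", [])])).items
      = [("increasing", (numeric.filter (fun p => (List.lookup "trend" p.2).getD "unknown" == "increasing")).map Prod.fst),
         ("decreasing", (numeric.filter (fun p => (List.lookup "trend" p.2).getD "unknown" == "decreasing")).map Prod.fst),
         ("stable", (numeric.filter (fun p => (List.lookup "trend" p.2).getD "unknown" == "stable")).map Prod.fst)] := by
  set d0 : PySem.Dict String (List String) :=
    PySem.Dict.ofList [("increasing", []), ("decreasing", []), ("stable", [])] with hd0
  have hkeys : (numeric.foldl pvStep d0).keys = ["increasing", "decreasing", "stable"] := by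
    rw [pvFold_keys]; decide
  have hnd : (numeric.foldl pvStep d0).keys.Nodup := by rw [hkeys]; decide
  rw [PySem.Dict.items_eq_map_keys _ hnd [], hkeys]
  simp only [List.map_cons, List.map_nil]
  rw [pvFold_getD numeric d0 "increasing" (by decide),
      pvFold_getD numeric d0 "decreasing" (by decide),
      pvFold_getD numeric d0 "stable" (by decide)]
  rfl

-- ===== VERDICT (by name: the statement is the Claim_ definition above) =====
theorem format_trend_analysis_py_spec : Claim_equal_format_trend_analysis_py := by
  intro insights _
  unfold Spec_format_trend_analysis_py format_trend_analysis_py format_trend_analysis_py_alt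
  simp only []
  rw [show (fun (tr : PySem.Dict String (List String)) (p : String × List (String × String)) =>
        let trend := (List.lookup "trend" p.2).getD "unknown"
        if tr.contains trend then tr.modify trend [] (fun cs => cs ++ [p.1]) else tr) = pvStep
      from rfl]
  rw [pvTrends_items]
  simp [List.foldl]
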